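-- pv_equiv track=rewrite | github.com/przemo-stefo/ListingBuilderPro | listing_builder/description_builder.py | _build_features_paragraph
-- ===== SOURCE A (Python) =====
-- from typing import List, Dict
--
-- def _build_features_paragraph(keywords: List[Dict]) -> str:
--     """
--     Build features paragraph with keyword integration.
--
--     WHY: Middle paragraph = feature details
--     WHY: Integrate tier 3 keywords naturally
--     """
--     phrases = [k['phrase'] for k in keywords[:10] if keywords]
--
--     # WHY: Start with generic features text if no keywords
--     if not phrases:
--         return "Key Features: Premium construction ensures long-lasting durability and exceptional performance for all your needs."
--
--     features = "Key Features: "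
--
--     # WHY: List features in natural sentence structure
--     if len(phrases) >= 1:
--         features += f"Designed for {phrases[0]}"
--
--     if len(phrases) >= 2:
--         features += f", featuring {phrases[1]}"
--
--     if len(phrases) >= 3:
--         features += f", with {phrases[2]}. "
--     else:
--         features += ". "
--
--     if len(phrases) >= 4:
--         features += f"Perfect for {phrases[3]}"
--
--         if len(phrases) >= 5:
--             features += f", ideal as {phrases[4]}"
--
--         if len(phrases) >= 6:
--             features += f", and great for {phrases[5]}. "
--         else:
--             features += ". "
--
--     if len(phrases) >= 7:
--         features += f"Includes {phrases[6]}"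
--
--         if len(phrases) >= 8:
--             features += f", {phrases[7]}"
--
--         if len(phrases) >= 9:
--             features += f", and {phrases[8]}"
--
--         features += " for complete satisfaction."
--
--     return features
-- ===== SOURCE B (Python) =====
-- def _build_features_paragraph(keywords):
--     """Same output as A; B: data-driven loop over a table of sentence groups instead of the branch chain."""
--     phrases = [k['phrase'] for k in keywords[:10] if keywords]
--
--     if not phrases:
--         return "Key Features: Premium construction ensures long-lasting durability and exceptional performance for all your needs."
--
--     groups = [
--         (0, ["Designed for ", ", featuring ", ", with "], ". "),
--         (3, ["Perfect for ", ", ideal as ", ", and great for "], ". "),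
--         (6, ["Includes ", ", ", ", and "], " for complete satisfaction."),
--     ]
--
--     features = "Key Features: "
--     n = len(phrases)
--     for start, connectors, terminator in groups:
--         if start < n:
--             for conn, phrase in zip(connectors, phrases[start:start + 3]):
--                 features += conn + phrase
--             features += terminator
--     return features
-- ===== Notes on version B (the rewrite author's own statement) =====
-- stated objective: alternative
-- what changed: The 9-branch if-chain with its nested punctuation special cases is replaced by a single loop over a data table of three sentence groups (start index, connector strings, terminator), appending connector+phrase for each present phrase and the group's terminator when the group fires.
import Mathlib
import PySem

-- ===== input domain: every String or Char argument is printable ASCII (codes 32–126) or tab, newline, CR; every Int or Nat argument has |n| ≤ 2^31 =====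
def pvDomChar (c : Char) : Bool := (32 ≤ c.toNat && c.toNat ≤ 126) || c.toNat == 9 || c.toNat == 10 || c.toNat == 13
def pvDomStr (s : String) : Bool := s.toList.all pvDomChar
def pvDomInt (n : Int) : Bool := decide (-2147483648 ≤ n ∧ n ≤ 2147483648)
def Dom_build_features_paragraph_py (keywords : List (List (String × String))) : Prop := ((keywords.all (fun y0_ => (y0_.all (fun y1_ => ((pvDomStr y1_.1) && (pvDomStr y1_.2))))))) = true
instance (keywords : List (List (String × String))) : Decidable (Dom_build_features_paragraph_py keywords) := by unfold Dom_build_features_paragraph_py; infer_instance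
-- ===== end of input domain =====

-- B replaces A's nine-branch if-chain by one loop over a data table of three sentence
-- groups (start index, connector strings, terminator); same output, alternative structure.

-- ===== PORT A =====
-- shared by both ports — both Pythons start with the identical line
--   phrases = [k['phrase'] for k in keywords[:10] if keywords]
-- k['phrase'] raises KeyError when the key is absent (lookup = none); Pre_ excludes
-- exactly those inputs, so the getD "" default is never used inside Pre_.
def pvPhrases (keywords : List (List (String × String))) : List String :=
  (PySem.List.slice keywords none (some 10)).filterMap
    (fun k => if keywords.isEmpty then none else some ((k.lookup "phrase").getD ""))

-- A's if-chain over the phrase list (features += …, branch by branch, in A's order)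
def pvBuildA (phrases : List String) : String :=
  let n := phrases.length
  let features := "Key Features: "
  let features := if n ≥ 1 then features ++ "Designed for " ++ phrases.getD 0 "" else features
  let features := if n ≥ 2 then features ++ ", featuring " ++ phrases.getD 1 "" else features
  let features := if n ≥ 3 then features ++ ", with " ++ phrases.getD 2 "" ++ ". " else features ++ ". "
  let features :=
    if n ≥ 4 then
      let features := features ++ "Perfect for " ++ phrases.getD 3 ""
      let features := if n ≥ 5 then features ++ ", ideal as " ++ phrases.getD 4 "" else features
      if n ≥ 6 then features ++ ", and great for " ++ phrases.getD 5 "" ++ ". " else features ++ ". "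
    else features
  if n ≥ 7 then
    let features := features ++ "Includes " ++ phrases.getD 6 ""
    let features := if n ≥ 8 then features ++ ", " ++ phrases.getD 7 "" else features
    let features := if n ≥ 9 then features ++ ", and " ++ phrases.getD 8 "" else features
    features ++ " for complete satisfaction."
  else features

def build_features_paragraph_py (keywords : List (List (String × String))) : String :=
  let phrases := pvPhrases keywords
  if phrases.isEmpty then
    "Key Features: Premium construction ensures long-lasting durability and exceptional performance for all your needs."
  else pvBuildA phrases

-- ===== PORT B =====
-- B's table of sentence groups: (start index, connector strings, terminator)
def pvGroups : List (Nat × List String × String) :=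
  [(0, ["Designed for ", ", featuring ", ", with "], ". "),
   (3, ["Perfect for ", ", ideal as ", ", and great for "], ". "),
   (6, ["Includes ", ", ", ", and "], " for complete satisfaction.")]

-- B's loop: for each group whose start phrase exists, append connector+phrase over the
-- connectors zipped with the group's 3-phrase slice, then the group's terminator
def pvBuildB (phrases : List String) : String :=
  let n := phrases.length
  pvGroups.foldl (fun feats g =>
    if g.1 < n then
      ((g.2.1.zip (PySem.List.slice phrases (some (g.1 : Int)) (some ((g.1 : Int) + 3)))).foldl
        (fun f cp => f ++ cp.1 ++ cp.2) feats) ++ g.2.2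
    else feats) "Key Features: "

def build_features_paragraph_py_alt (keywords : List (List (String × String))) : String :=
  let phrases := pvPhrases keywords
  if phrases.isEmpty then
    "Key Features: Premium construction ensures long-lasting durability and exceptional performance for all your needs."
  else pvBuildB phrases

-- ===== PRECONDITION & SPEC =====
-- Pre_ excludes exactly the inputs on which the Python A raises KeyError: a dict among
-- the first ten lacking the key 'phrase'.
def Pre_build_features_paragraph_py (keywords : List (List (String × String))) : Prop :=
  ∀ k ∈ PySem.List.slice keywords none (some 10), (k.lookup "phrase").isSome
instance (keywords : List (List (String × String))) : Decidable (Pre_build_features_paragraph_py keywords) := by unfold Pre_build_features_paragraph_py; infer_instance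
def pvWitness_build_features_paragraph_py : (List (List (String × String))) := [[("phrase", "daily use")]]

def Spec_build_features_paragraph_py (keywords : List (List (String × String))) (out : String) : Prop := out = build_features_paragraph_py_alt keywords
instance (keywords : List (List (String × String))) (out : String) : Decidable (Spec_build_features_paragraph_py keywords out) := by unfold Spec_build_features_paragraph_py; infer_instance

-- ===== CLAIM (what is proved, stated in full; the proofs are below) =====
def Claim_equal_build_features_paragraph_py : Prop := ∀ (keywords : List (List (String × String))), Dom_build_features_paragraph_py keywords → Pre_build_features_paragraph_py keywords → Spec_build_features_paragraph_py keywords (build_features_paragraph_py keywords)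

-- ===== LEMMAS AND PROOFS =====

-- the if-chain and the group loop assemble the same sentence for every nonempty phrase list
lemma pvBuildEq (ps : List String) (hne : ps ≠ []) :
    pvBuildA ps = pvBuildB ps := by
  rcases ps with _|⟨a,_|⟨b,_|⟨c,_|⟨d,_|⟨e,_|⟨f,_|⟨g,_|⟨h,_|⟨i,_|⟨j,rest⟩⟩⟩⟩⟩⟩⟩⟩⟩⟩
  · exact absurd rfl hne
  all_goals simp [pvBuildA, pvBuildB, pvGroups, PySem.List.slice_toNat, ← String.append_assoc]

-- ===== VERDICT (by name: the statement is the Claim_ definition above) =====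
theorem build_features_paragraph_py_spec : Claim_equal_build_features_paragraph_py := by
  intro keywords _ _
  unfold Spec_build_features_paragraph_py build_features_paragraph_py build_features_paragraph_py_alt
  by_cases h : (pvPhrases keywords).isEmpty
  · simp [h]
  · simp only [h, Bool.false_eq_true]
    exact pvBuildEq _ (by simpa [List.isEmpty_iff] using h)
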